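-- pv_equiv track=rewrite | github.com/RtgKid/practice-python | problems/codesignal/interview_practice/arrays/first_duplicate.py | solution
-- ===== SOURCE A (Python) =====
-- def solution(a):
--     occ_ind = -1
--     d = {}
--     for idx, i in enumerate(a):
--         if i not in d:
--             d[i] = 0
--         else:
--             occ_ind = idx
--             return a[occ_ind]
--     return -1
-- ===== SOURCE B (Python) =====
-- def solution(a):
--     occ = {}
--     for idx, x in enumerate(a):
--         occ.setdefault(x, []).append(idx)
--     best_val = -1
--     best_idx = None
--     for val, idxs in occ.items():
--         if len(idxs) >= 2 and (best_idx is None or idxs[1] < best_idx):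
--             best_val = val
--             best_idx = idxs[1]
--     return best_val
-- ===== Notes on version B (the rewrite author's own statement) =====
-- stated objective: alternative
-- what changed: Replaces A's early-exit scan with a maintained seen-dict by a two-phase build-table-then-argmin: one pass grouping each value's occurrence indices, then a pass over the table picking the value with the smallest second-occurrence index.
import Mathlib
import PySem

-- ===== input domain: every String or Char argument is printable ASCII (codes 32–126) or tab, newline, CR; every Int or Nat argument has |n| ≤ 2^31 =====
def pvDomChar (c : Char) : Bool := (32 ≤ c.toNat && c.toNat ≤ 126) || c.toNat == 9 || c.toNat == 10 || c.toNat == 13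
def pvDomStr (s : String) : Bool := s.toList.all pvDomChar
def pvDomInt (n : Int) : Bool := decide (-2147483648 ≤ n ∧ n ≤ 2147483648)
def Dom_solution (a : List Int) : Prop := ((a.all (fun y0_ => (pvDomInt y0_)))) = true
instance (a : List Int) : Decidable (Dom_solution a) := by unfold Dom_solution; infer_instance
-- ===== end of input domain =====

-- B replaces A's early-exit scan (seen-dict, return at the first repeat) by a two-phase
-- build-table-then-argmin decomposition: group occurrence indices per value, then pick the
-- value whose second occurrence index is smallest (objective: alternative, same cost).

-- ===== PORT A =====
-- the loop 'for idx, i in enumerate(a)': d holds the already-seen values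
def solutionGo (a : List Int) : List (Int × Int) → PySem.Dict Int Int → Int
  | [], _ => -1
  | (idx, i) :: rest, d =>
    if d.contains i = false then solutionGo a rest (d.insert i 0)
    else PySem.List.pyGetD a idx 0   -- a[occ_ind] with occ_ind = idx; exact: 0 ≤ idx < len a

def solution (a : List Int) : Int :=
  solutionGo a (PySem.List.enumerate a 0) PySem.Dict.empty

-- ===== PORT B =====
-- occ.setdefault(x, []).append(idx)  ≡  occ[x] = occ.get(x, []) + [idx]
def buildStep (d : PySem.Dict Int (List Int)) (p : Int × Int) : PySem.Dict Int (List Int) :=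
  d.modify p.2 [] (fun l => l ++ [p.1])

-- one step of the second loop; state = (best_val, best_idx); idxs[1] read only when len ≥ 2
def bestStep (st : Int × Option Int) (p : Int × List Int) : Int × Option Int :=
  if 2 ≤ p.2.length ∧ (st.2 = none ∨ p.2.getD 1 0 < st.2.getD 0) then (p.1, some (p.2.getD 1 0))
  else st

def solution_alt (a : List Int) : Int :=
  let occ := (PySem.List.enumerate a 0).foldl buildStep PySem.Dict.empty
  (occ.items.foldl bestStep (-1, none)).1

-- ===== PRECONDITION & SPEC =====
def Spec_solution (a : List Int) (out : Int) : Prop := out = solution_alt a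
instance (a : List Int) (out : Int) : Decidable (Spec_solution a out) := by unfold Spec_solution; infer_instance

-- ===== CLAIM (what is proved, stated in full; the proofs are below) =====
def Claim_equal_solution : Prop := ∀ (a : List Int), Dom_solution a → Spec_solution a (solution a)

-- ===== LEMMAS AND PROOFS =====

-- occurrence indices of v in a, in increasing order
def occs (a : List Int) (v : Int) : List Int :=
  ((PySem.List.enumerate a 0).filter (fun p => p.2 == v)).map (·.1)

-- "index n is a duplicate position": a[n] already occurs strictly before n
def dupP (a : List Int) (n : Nat) : Bool := decide (a.getD n 0 ∈ a.take n)

lemma A_loop (a : List Int) : ∀ (t : List Int) (m : Nat) (d : PySem.Dict Int Int),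
    a.drop m = t →
    (∀ x, d.contains x = decide (x ∈ a.take m)) →
    solutionGo a (PySem.List.enumerate t (m : Int)) d =
      match (List.range' m t.length).find? (dupP a) with
      | some k => a.getD k 0
      | none => -1 := by
  intro t
  induction t with
  | nil => intro m d _ _; simp [PySem.List.enumerate_nil, solutionGo]
  | cons x rest ih =>
    intro m d hdrop hcont
    have hm : m < a.length := by
      have := congrArg List.length hdrop
      simp at this; omega
    have hx : a.getD m 0 = x := by
      rw [List.getD_eq_getElem _ 0 hm]
      have := List.drop_eq_getElem_cons hm
      rw [hdrop] at this
      exact (List.cons.injEq _ _ _ _ ▸ this).1.symm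
    have hcx : d.contains x = dupP a m := by
      rw [hcont x, dupP, hx]
    rw [PySem.List.enumerate_cons, solutionGo]
    simp only [List.length_cons, List.range'_succ]
    rw [List.find?_cons]
    cases hdm : dupP a m with
    | true =>
      rw [hcx, hdm]
      simp only [Bool.true_eq_false, if_false]
      rw [PySem.List.pyGetD_natCast]
    | false =>
      rw [hcx, hdm]
      simp only [if_true]
      have hdrop' : a.drop (m + 1) = rest := by
        have : a.drop (m+1) = (a.drop m).drop 1 := by rw [List.drop_drop]
        rw [this, hdrop]; rfl
      have htake : a.take (m + 1) = a.take m ++ [x] := by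
        have hx' : a[m] = x := by rw [← List.getD_eq_getElem a 0 hm]; exact hx
        rw [List.take_add_one]
        simp [List.getElem?_eq_getElem hm, hx']
      have hcont' : ∀ y, (d.insert x 0).contains y = decide (y ∈ a.take (m+1)) := by
        intro y
        rw [PySem.Dict.contains_insert, hcont y, htake]
        by_cases hy : y = x <;> simp [hy]
      have hcast : ((m : Int) + 1) = (((m + 1 : Nat)) : Int) := by push_cast; ring
      rw [hcast, ih (m+1) (d.insert x 0) hdrop' hcont']


lemma solution_eq_find (a : List Int) :
    solution a =
      match (List.range' 0 a.length).find? (dupP a) with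
      | some k => a.getD k 0
      | none => -1 := by
  unfold solution
  have h := A_loop a a 0 PySem.Dict.empty (by simp) (fun x => by simp)
  simpa using h

lemma build_getD (v : Int) : ∀ (l : List (Int × Int)) (d : PySem.Dict Int (List Int)),
    (l.foldl buildStep d).getD v [] = d.getD v [] ++ (l.filter (fun p => p.2 == v)).map (·.1) := by
  intro l
  induction l with
  | nil => intro d; simp
  | cons p T ih =>
    intro d
    rw [List.foldl_cons, ih]
    by_cases h : p.2 = v
    · rw [List.filter_cons_of_pos (by simpa using h)]
      simp [buildStep, h]
    · rw [List.filter_cons_of_neg (by simpa using h)]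
      simp [buildStep, PySem.Dict.getD_modify, Ne.symm h]

lemma occ_items (a : List Int) :
    ((PySem.List.enumerate a 0).foldl buildStep PySem.Dict.empty).items
      = (PySem.Set.ofList a).map (fun v => (v, occs a v)) := by
  have hkeys : ((PySem.List.enumerate a 0).foldl buildStep PySem.Dict.empty).keys
      = PySem.Set.ofList a := by
    have := PySem.Dict.keys_foldl_modify_key (l := PySem.List.enumerate a 0)
      (key := Prod.snd) (d0 := ([] : List Int))
      (f := fun _ p => (fun l => l ++ [p.1])) (d := PySem.Dict.empty)
    rw [show (PySem.List.enumerate a 0).foldl buildStep PySem.Dict.empty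
        = (PySem.List.enumerate a 0).foldl
            (fun d x => d.modify (Prod.snd x) [] ((fun _ p => (fun l => l ++ [p.1])) d x))
            PySem.Dict.empty from rfl, this]
    simp [PySem.List.map_snd_enumerate, PySem.Set.update, PySem.Set.ofList_eq_foldl]
  have hnd : ((PySem.List.enumerate a 0).foldl buildStep PySem.Dict.empty).keys.Nodup := by
    rw [hkeys]; exact PySem.Set.nodup_ofList a
  rw [PySem.Dict.items_eq_map_keys _ hnd ([] : List Int), hkeys]
  apply List.map_congr_left
  intro v hv
  have := build_getD v (PySem.List.enumerate a 0) PySem.Dict.empty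
  simp only [PySem.Dict.getD_empty, List.nil_append] at this
  rw [this]; rfl

lemma mem_occs {a : List Int} {v j : Int} :
    j ∈ occs a v ↔ ∃ n : Nat, n < a.length ∧ j = (n : Int) ∧ a.getD n 0 = v := by
  constructor
  · intro h
    rcases List.mem_map.mp h with ⟨p, hp, hj⟩
    rcases List.mem_filter.mp hp with ⟨hpe, hpv⟩
    rcases (PySem.List.mem_enumerate_iff _ _ _).mp hpe with ⟨n, hn, rfl⟩
    refine ⟨n, hn, ?_, ?_⟩
    · simpa using hj.symm
    · simp at hpv
      rw [List.getD_eq_getElem _ _ hn]; exact hpv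
  · rintro ⟨n, hn, rfl, hv⟩
    apply List.mem_map.mpr
    refine ⟨((n : Int), a[n]), List.mem_filter.mpr ⟨?_, ?_⟩, rfl⟩
    · exact (PySem.List.mem_enumerate_iff _ _ _).mpr ⟨n, hn, by simp⟩
    · show (a[n] == v) = true
      rw [beq_iff_eq, ← List.getD_eq_getElem a 0 hn]
      exact hv

lemma occs_sorted (a : List Int) (v : Int) : (occs a v).Pairwise (· < ·) := by
  unfold occs
  rw [List.pairwise_map]
  exact (PySem.List.pairwise_lt_enumerate a 0).filter _

lemma second_facts (l : List Int) (hp : l.Pairwise (· < ·)) (h2 : 2 ≤ l.length) :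
    l.getD 0 0 ∈ l ∧ l.getD 1 0 ∈ l ∧ l.getD 0 0 < l.getD 1 0 := by
  match l with
  | x :: y :: rest =>
    refine ⟨by simp, by simp, ?_⟩
    simp only [List.getD_cons_zero, List.getD_cons_succ]
    exact (List.pairwise_cons.mp hp).1 y (by simp)

lemma find?_range'_min : ∀ (n s : Nat) (p : Nat → Bool) (k : Nat),
    (List.range' s n).find? p = some k → ∀ j, s ≤ j → j < k → p j = false := by
  intro n
  induction n with
  | zero => intro s p k h; simp [List.range'] at h
  | succ n ih =>
    intro s p k h j hsj hjk
    rw [List.range'_succ] at h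
    cases hps : p s with
    | true =>
      rw [List.find?_cons_of_pos (by simp [hps])] at h
      simp at h; omega
    | false =>
      rw [List.find?_cons_of_neg (by simp [hps])] at h
      rcases Nat.eq_or_lt_of_le hsj with rfl | hlt
      · exact hps
      · exact ih (s+1) p k h j hlt hjk
  
lemma good_second_dup {a : List Int} (v : Int) (h2 : 2 ≤ (occs a v).length) :
    ∃ n : Nat, n < a.length ∧ (occs a v).getD 1 0 = (n : Int) ∧ a.getD n 0 = v ∧ dupP a n = true := by
  obtain ⟨h0m, h1m, hlt⟩ := second_facts _ (occs_sorted a v) h2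
  rcases mem_occs.mp h1m with ⟨n, hn, he1, hv1⟩
  rcases mem_occs.mp h0m with ⟨m, hm, he0, hv0⟩
  have hmn : m < n := by rw [he0, he1] at hlt; exact_mod_cast hlt
  refine ⟨n, hn, he1, hv1, ?_⟩
  unfold dupP
  rw [decide_eq_true_iff, hv1, ← hv0, List.getD_eq_getElem a 0 hm]
  exact List.mem_take_iff_getElem.mpr ⟨m, by omega, rfl⟩

lemma second_eq_k {a : List Int} {k : Nat} (hk : k < a.length) (hd : dupP a k = true)
    (hmin : ∀ j, j < k → dupP a j = false) :
    2 ≤ (occs a (a.getD k 0)).length ∧ (occs a (a.getD k 0)).getD 1 0 = (k : Int) := by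
  set v := a.getD k 0 with hv
  -- the earlier occurrence m
  have hdk : a.getD k 0 ∈ a.take k := by
    have := hd; unfold dupP at this; exact decide_eq_true_iff.mp this
  rcases List.mem_take_iff_getElem.mp hdk with ⟨m, hmlt, hma⟩
  have hm : m < a.length := by omega
  have hmk : m < k := by omega
  have hmav : a.getD m 0 = v := by rw [List.getD_eq_getElem a 0 hm, hma]
  have hkocc : (k : Int) ∈ occs a v := mem_occs.mpr ⟨k, hk, rfl, rfl⟩
  have hmocc : (m : Int) ∈ occs a v := mem_occs.mpr ⟨m, hm, rfl, hmav⟩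
  -- uniqueness below k
  have huniq : ∀ (j : Nat), j < a.length → a.getD j 0 = v → j < k → j = m := by
    intro j hj hjv hjk
    by_contra hne
    rcases Nat.lt_or_ge j m with h | h
    · -- j < m: then dupP a m would be true
      have : dupP a m = true := by
        unfold dupP
        rw [decide_eq_true_iff, hmav, ← hjv, List.getD_eq_getElem a 0 hj]
        exact List.mem_take_iff_getElem.mpr ⟨j, by omega, rfl⟩
      rw [hmin m hmk] at this; exact Bool.noConfusion this
    · have hmj : m < j := by omega
      have : dupP a j = true := by
        unfold dupP
        rw [decide_eq_true_iff, hjv, ← hmav, List.getD_eq_getElem a 0 hm]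
        exact List.mem_take_iff_getElem.mpr ⟨m, by omega, rfl⟩
      rw [hmin j hjk] at this; exact Bool.noConfusion this
  -- now analyse the sorted list
  have hsort := occs_sorted a v
  have hne : ((m : Int)) ≠ ((k : Int)) := by exact_mod_cast Nat.ne_of_lt hmk
  have h2 : 2 ≤ (occs a v).length := by
    match hl : occs a v with
    | [] => rw [hl] at hkocc; exact absurd hkocc (List.not_mem_nil)
    | [x] =>
      rw [hl] at hkocc hmocc
      simp at hkocc hmocc
      exact absurd (hmocc.trans hkocc.symm) hne
    | x :: y :: rest => simp
  refine ⟨h2, ?_⟩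
  obtain ⟨x, y, rest, hl⟩ : ∃ x y rest, occs a v = x :: y :: rest := by
    rcases hlc : occs a v with _ | ⟨x, _ | ⟨y, rest⟩⟩
    · rw [hlc] at h2; simp at h2
    · rw [hlc] at h2; simp at h2
    · exact ⟨x, y, rest, rfl⟩
  rw [hl]
  rw [hl] at hsort hkocc hmocc
  have hpw := List.pairwise_cons.mp hsort
  have hpw2 := List.pairwise_cons.mp hpw.2
  -- x is an occurrence index
  have hxocc : x ∈ occs a v := by rw [hl]; simp
  have hyocc : y ∈ occs a v := by rw [hl]; simp
  rcases mem_occs.mp hxocc with ⟨nx, hnx, hxe, hvx⟩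
  rcases mem_occs.mp hyocc with ⟨ny, hny, hye, hvy⟩
  -- x = (m : Int)
  have hxm : x = (m : Int) := by
    have hxk : x < (k : Int) := by
      rcases List.mem_cons.mp hkocc with h | h
      · -- k = x : then m, being another member, is larger than k; contradiction
        exfalso
        rcases List.mem_cons.mp hmocc with hm' | hm'
        · rw [← h] at hm'; exact hne hm'
        · have := hpw.1 (m : Int) hm'
          rw [← h] at this
          have : k < m := by exact_mod_cast this
          omega
      · exact hpw.1 _ h
    have hnxk : nx < k := by rw [hxe] at hxk; exact_mod_cast hxk
    rw [hxe, huniq nx hnx hvx hnxk]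
  -- y = (k : Int)
  rcases List.mem_cons.mp hkocc with h | h
  · exfalso; rw [← h] at hxm
    have : k = m := by exact_mod_cast hxm
    omega
  rcases List.mem_cons.mp h with h | h
  · simp [h.symm]
  · exfalso
    have hyk : y < (k : Int) := hpw2.1 _ h
    have hnyk : ny < k := by rw [hye] at hyk; exact_mod_cast hyk
    have hnym := huniq ny hny hvy hnyk
    have hxy : x = y := by rw [hxm, hye, hnym]
    exact absurd (hpw.1 y (by simp)) (by rw [hxy]; exact lt_irrefl y)

lemma fold_keep (κ : Int) : ∀ (L : List (Int × List Int)) (st : Int × Option Int),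
    st.2 = some κ → (∀ p ∈ L, 2 ≤ p.2.length → κ < p.2.getD 1 0) →
    L.foldl bestStep st = st := by
  intro L
  induction L with
  | nil => intro st _ _; rfl
  | cons q T ih =>
    intro st hst hall
    have hstep : bestStep st q = st := by
      unfold bestStep
      rw [if_neg]
      rintro ⟨hg, hor⟩
      rcases hor with h | h
      · simp [hst] at h
      · rw [hst] at h; simp at h
        exact absurd h (not_lt.mpr (le_of_lt (hall q (by simp) hg)))
    simpa [List.foldl_cons, hstep] using ih st hst (fun p hp => hall p (by simp [hp]))

lemma fold_nogood : ∀ (L : List (Int × List Int)) (st : Int × Option Int),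
    (∀ p ∈ L, ¬ 2 ≤ p.2.length) → L.foldl bestStep st = st := by
  intro L
  induction L with
  | nil => intro st _; rfl
  | cons q T ih =>
    intro st hall
    have hstep : bestStep st q = st := by
      unfold bestStep
      rw [if_neg]
      rintro ⟨hg, _⟩
      exact hall q (by simp) hg
    simpa [List.foldl_cons, hstep] using ih st (fun p hp => hall p (by simp [hp]))

lemma fold_main (κ v₀ : Int) : ∀ (L : List (Int × List Int)) (st : Int × Option Int),
    (L.map Prod.fst).Nodup →
    (∀ p ∈ L, 2 ≤ p.2.length → κ ≤ p.2.getD 1 0 ∧ (p.2.getD 1 0 = κ → p.1 = v₀)) →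
    (∃ p ∈ L, p.1 = v₀ ∧ 2 ≤ p.2.length ∧ p.2.getD 1 0 = κ) →
    (st.2 = none ∨ ∃ b, st.2 = some b ∧ κ < b) →
    (L.foldl bestStep st).1 = v₀ := by
  intro L
  induction L with
  | nil => rintro st _ _ ⟨p, hp, _⟩ _; exact absurd hp (List.not_mem_nil)
  | cons q T ih =>
    intro st hnd hall hex hst
    rw [List.map_cons, List.nodup_cons] at hnd
    by_cases hq : 2 ≤ q.2.length ∧ q.2.getD 1 0 = κ
    · -- q is the winning entry
      have hqv : q.1 = v₀ := (hall q (by simp) hq.1).2 hq.2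
      have hstep : bestStep st q = (q.1, some κ) := by
        unfold bestStep
        rw [if_pos, hq.2]
        refine ⟨hq.1, ?_⟩
        rcases hst with h | ⟨b, hb, hkb⟩
        · exact Or.inl h
        · right; rw [hb, hq.2]; simpa using hkb
      rw [List.foldl_cons, hstep]
      rw [fold_keep κ T (q.1, some κ) rfl ?later]
      · exact hqv
      case later =>
        intro p hp hg
        rcases hall p (by simp [hp]) hg with ⟨hle, heq⟩
        rcases lt_or_eq_of_le hle with h | h
        · exact h
        · exfalso
          have hpv : p.1 = v₀ := heq h.symm
          have : Prod.fst p = q.1 := by rw [hpv, hqv]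
          exact hnd.1 (List.mem_map.mpr ⟨p, hp, this⟩)
    · -- q is not the winner; witness is in T, and state invariant is preserved
      have hex' : ∃ p ∈ T, p.1 = v₀ ∧ 2 ≤ p.2.length ∧ p.2.getD 1 0 = κ := by
        rcases hex with ⟨p, hp, h1, h2, h3⟩
        rcases List.mem_cons.mp hp with rfl | hp'
        · exact absurd ⟨h2, h3⟩ hq
        · exact ⟨p, hp', h1, h2, h3⟩
      have hst' : (bestStep st q).2 = none ∨ ∃ b, (bestStep st q).2 = some b ∧ κ < b := by
        unfold bestStep
        split
        · rename_i hcond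
          right
          refine ⟨q.2.getD 1 0, rfl, ?_⟩
          rcases hall q (by simp) hcond.1 with ⟨hle, heq⟩
          rcases lt_or_eq_of_le hle with h | h
          · exact h
          · exact absurd ⟨hcond.1, h.symm⟩ hq
        · exact hst
      rw [List.foldl_cons]
      exact ih (bestStep st q) hnd.2 (fun p hp => hall p (by simp [hp])) hex' hst'

-- ===== VERDICT (by name: the statement is the Claim_ definition above) =====
theorem solution_spec : Claim_equal_solution := by
  unfold Claim_equal_solution
  intro a _
  unfold Spec_solution
  rw [solution_eq_find]
  have halt : solution_alt a
      = (((PySem.Set.ofList a).map (fun v => (v, occs a v))).foldl bestStep (-1, none)).1 := by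
    show (((PySem.List.enumerate a 0).foldl buildStep PySem.Dict.empty).items.foldl
      bestStep (-1, none)).1 = _
    rw [occ_items]
  rw [halt]
  cases hf : (List.range' 0 a.length).find? (dupP a) with
  | none =>
    have hnone := List.find?_eq_none.mp hf
    rw [fold_nogood _ (-1, none) ?h]
    case h =>
      intro p hp h2
      rcases List.mem_map.mp hp with ⟨v, hv, rfl⟩
      rcases good_second_dup v h2 with ⟨n, hn, _, _, hdn⟩
      have : n ∈ List.range' 0 a.length := List.mem_range'_1.mpr ⟨Nat.zero_le n, by omega⟩
      exact absurd hdn (by simpa using hnone n this)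
  | some k =>
    have hdk : dupP a k = true := List.find?_some hf
    have hk : k < a.length := by
      have := List.mem_range'_1.mp (List.mem_of_find?_eq_some hf); omega
    have hmin : ∀ j, j < k → dupP a j = false := fun j hj =>
      find?_range'_min _ 0 _ k hf j (Nat.zero_le j) hj
    obtain ⟨h2, hsec⟩ := second_eq_k hk hdk hmin
    refine (fold_main (k : Int) (a.getD k 0) _ (-1, none) ?nd ?all ?ex (Or.inl rfl)).symm
    case nd =>
      have : ((PySem.Set.ofList a).map (fun v => (v, occs a v))).map Prod.fst
          = PySem.Set.ofList a := by
        simp [Function.comp_def]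
      rw [this]; exact PySem.Set.nodup_ofList a
    case all =>
      intro p hp hg
      rcases List.mem_map.mp hp with ⟨v, hv, rfl⟩
      rcases good_second_dup v hg with ⟨n, hn, hsecv, hvn, hdn⟩
      have hkn : k ≤ n := by
        by_contra h
        rw [hmin n (by omega)] at hdn; exact Bool.noConfusion hdn
      constructor
      · show (k : Int) ≤ (occs a v).getD 1 0
        rw [hsecv]; exact_mod_cast hkn
      · intro he
        show v = a.getD k 0
        rw [hsecv] at he
        have : n = k := by exact_mod_cast he
        rw [← hvn, this]
    case ex =>
      refine ⟨(a.getD k 0, occs a (a.getD k 0)), ?_, rfl, h2, hsec⟩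
      apply List.mem_map.mpr
      refine ⟨a.getD k 0, ?_, rfl⟩
      apply (PySem.Set.mem_ofList _ _).mpr
      rw [List.getD_eq_getElem a 0 hk]
      exact List.getElem_mem hk
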